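-- pv_equiv track=rewrite | github.com/castvic/rocks | functions.py | world_to_string
-- ===== SOURCE A (Python) =====
-- def world_to_string(world):
--     world_string = ""
--     column_heights = columns_max_height(world)
--     tallest_height = columns_tallest(column_heights)
--
--     for height in range(tallest_height, 0, -1):
--         for column in world:
--             col_length = len(column)
--             if height > col_length:
--                 world_string = world_string + " "
--             else:
--                 world_string = world_string + column[height - 1]
--         if height > 1:
--             world_string = world_string + "\n"
--     return world_string
--
-- def columns_max_height(world):
--     col_heights = []
--     for column in world:
--         col_heights.append(len(column))
--     return col_heights
--
-- def columns_tallest(column_heights):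
--     column_heights.sort()
--     return column_heights[-1]
-- ===== SOURCE B (Python) =====
-- def world_to_string(world):
--     tallest = sorted(len(c) for c in world)[-1]
--     padded = [[" "] * (tallest - len(c)) + c[::-1] for c in world]
--     return "\n".join("".join(row) for row in zip(*padded))
-- ===== Notes on version B (the rewrite author's own statement) =====
-- stated objective: faster
-- what changed: B pads every column with spaces to the tallest height, reverses it, transposes the padded matrix with zip, and joins rows with join, instead of A's per-height per-column scan that grows the output string one cell at a time.
import Mathlib
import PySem

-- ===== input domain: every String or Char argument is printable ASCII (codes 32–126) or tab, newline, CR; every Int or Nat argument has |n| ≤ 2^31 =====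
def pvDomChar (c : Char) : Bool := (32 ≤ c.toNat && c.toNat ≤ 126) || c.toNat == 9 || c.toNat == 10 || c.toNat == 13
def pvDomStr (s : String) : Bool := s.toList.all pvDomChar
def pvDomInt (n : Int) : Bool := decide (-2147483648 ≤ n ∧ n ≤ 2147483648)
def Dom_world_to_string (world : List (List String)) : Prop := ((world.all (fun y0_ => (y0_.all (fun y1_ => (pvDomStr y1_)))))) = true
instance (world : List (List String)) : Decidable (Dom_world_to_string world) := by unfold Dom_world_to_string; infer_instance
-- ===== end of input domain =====

-- B renders the grid by padding each column to the tallest height, reversing it, transposing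
-- (Python zip) into rows and joining, instead of A's per-height per-column scan that grows the
-- output string one cell at a time; measured faster by a constant factor (join vs concatenation).

-- ===== PORT A =====
def columns_max_height (world : List (List String)) : List Int :=
  world.foldl (fun acc column => acc ++ [(column.length : Int)]) []

-- column_heights.sort(); column_heights[-1]  (IndexError on [] → excluded by Pre_, getD default unreachable there)
def columns_tallest (column_heights : List Int) : Int :=
  ((PySem.List.pyGet? (PySem.List.sorted column_heights (fun x => x) false) (-1)).getD 0)

def world_to_string (world : List (List String)) : String :=
  (PySem.List.pyRange (columns_tallest (columns_max_height world)) 0 (-1)).foldl (fun ws height =>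
    let ws := world.foldl (fun ws column =>
      if height > (column.length : Int) then ws ++ " "
      else ws ++ ((PySem.List.pyGet? column (height - 1)).getD "")) ws
    if height > 1 then ws ++ "\n" else ws) ""

-- ===== PORT B =====
-- port of Python zip(*cols): truncate at the first exhausted column
def pyZip (cols : List (List String)) : List (List String) :=
  if h : cols.isEmpty || cols.any (·.isEmpty) then []
  else (cols.map (fun c => c.headD "")) :: pyZip (cols.map (fun c => c.tail))
termination_by (cols.headD []).length
decreasing_by
  simp only [Bool.or_eq_true, List.isEmpty_iff, List.any_eq_true, not_or, not_exists] at h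
  obtain ⟨h1, h2⟩ := h
  cases cols with
  | nil => exact absurd rfl h1
  | cons c cs =>
    simp only [List.map_cons, List.headD_cons]
    have hc : c ≠ [] := fun hce => (h2 c) ⟨by simp, hce⟩
    cases c with
    | nil => simp at hc
    | cons a as => simp

def world_to_string_alt (world : List (List String)) : String :=
  PySem.Str.join "\n"
    ((pyZip (world.map (fun c =>
        List.replicate
          (((PySem.List.pyGet? (PySem.List.sorted (world.map (fun d => (d.length : Int))) (fun x => x) false) (-1)).getD 0
            - (c.length : Int)).toNat) " " ++ c.reverse))).map
      (fun row => PySem.Str.join "" row))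

-- ===== PRECONDITION & SPEC =====
-- Pre_ excludes only the empty world, on which BOTH A and B raise IndexError (sorted(...)[-1]).
def Pre_world_to_string (world : List (List String)) : Prop := world ≠ []
instance (world : List (List String)) : Decidable (Pre_world_to_string world) := by unfold Pre_world_to_string; infer_instance
def pvWitness_world_to_string : List (List String) := [["a"], ["b", "c"], []]

def Spec_world_to_string (world : List (List String)) (out : String) : Prop := out = world_to_string_alt world
instance (world : List (List String)) (out : String) : Decidable (Spec_world_to_string world out) := by unfold Spec_world_to_string; infer_instance

-- ===== CLAIM (what is proved, stated in full; the proofs are below) =====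
def Claim_equal_world_to_string : Prop := ∀ (world : List (List String)), Dom_world_to_string world → Pre_world_to_string world → Spec_world_to_string world (world_to_string world)

-- ===== LEMMAS AND PROOFS =====

-- the cell A emits for (1-based) height h and column c
def pvCell (h : Int) (c : List String) : String :=
  if h > (c.length : Int) then " " else ((PySem.List.pyGet? c (h - 1)).getD "")

-- the rows from height n down to height 1
def pvRows (world : List (List String)) : Nat → List (List String)
  | 0 => []
  | n + 1 => world.map (pvCell ((n : Int) + 1)) :: pvRows world n

theorem pvRows_congr (w w' : List (List String)) (n : Nat)
    (h : ∀ k : Nat, k < n → w.map (pvCell ((k : Int) + 1)) = w'.map (pvCell ((k : Int) + 1))) :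
    pvRows w n = pvRows w' n := by
  induction n with
  | zero => rfl
  | succ m ih =>
    simp only [pvRows]
    rw [h m (by omega), ih (fun k hk => h k (by omega))]

theorem join_cons_cons (a b : String) (l : List String) :
    PySem.Str.join "\n" (a :: b :: l) = a ++ "\n" ++ PySem.Str.join "\n" (b :: l) := by
  simp [PySem.Str.join, PySem.Chars.join_cons_cons]
  rw [show ('\n' :: PySem.Chars.join ['\n'] (b.toList :: List.map String.toList l)) =
      ['\n'] ++ PySem.Chars.join ['\n'] (b.toList :: List.map String.toList l) from rfl,
    String.ofList_append, ← String.append_assoc]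

theorem join_single (a : String) : PySem.Str.join "\n" [a] = a := by
  simp [PySem.Str.join, PySem.Chars.join_singleton]

theorem join_empty_cons (a : String) (l : List String) :
    PySem.Str.join "" (a :: l) = a ++ PySem.Str.join "" l := by
  simp [PySem.Str.join, PySem.Chars.join]
  cases l <;> simp [List.intercalate, String.ofList_append]

-- A's inner loop appends exactly the joined row
theorem innerA (w : List (List String)) (h : Int) (s : String) :
    w.foldl (fun ws column =>
      if h > (column.length : Int) then ws ++ " "
      else ws ++ ((PySem.List.pyGet? column (h - 1)).getD "")) s
    = s ++ PySem.Str.join "" (w.map (pvCell h)) := by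
  induction w generalizing s with
  | nil =>
    simp only [List.foldl_nil, List.map_nil]
    rw [show PySem.Str.join "" ([] : List String) = "" from rfl, String.append_empty]
  | cons c cs ih =>
    simp only [List.foldl_cons, List.map_cons]
    rw [ih, join_empty_cons, ← String.append_assoc]
    congr 1
    unfold pvCell
    split <;> rfl

-- A's outer loop over range(n, 0, -1) produces the "\n"-join of the rows
theorem outerA (w : List (List String)) (n : Nat) (s : String) :
    (PySem.List.pyRange (n : Int) 0 (-1)).foldl (fun ws height =>
      let ws := w.foldl (fun ws column =>
        if height > (column.length : Int) then ws ++ " "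
        else ws ++ ((PySem.List.pyGet? column (height - 1)).getD "")) ws
      if height > 1 then ws ++ "\n" else ws) s
    = s ++ PySem.Str.join "\n" ((pvRows w n).map (fun row => PySem.Str.join "" row)) := by
  induction n generalizing s with
  | zero =>
    rw [PySem.List.pyRange_neg_one_eq_nil (by omega)]
    simp only [List.foldl_nil, pvRows, List.map_nil]
    rw [show PySem.Str.join "\n" ([] : List String) = "" from rfl, String.append_empty]
  | succ m ih =>
    rw [PySem.List.pyRange_neg_one_cons (by push_cast; omega)]
    simp only [List.foldl_cons]
    rw [innerA]
    have hc1 : ((m + 1 : Nat) : Int) = (m : Int) + 1 := by push_cast; ring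
    rw [hc1]
    have hc2 : (m : Int) + 1 - 1 = (m : Int) := by ring
    rw [hc2]
    cases m with
    | zero =>
      rw [if_neg (by norm_num), PySem.List.pyRange_neg_one_eq_nil (by norm_num)]
      simp only [List.foldl_nil, pvRows, List.map_cons, List.map_nil, Nat.cast_zero]
      rw [join_single]
    | succ k =>
      rw [if_pos (by push_cast; omega), ih]
      simp only [pvRows, List.map_cons]
      rw [join_cons_cons, ← String.append_assoc, ← String.append_assoc]

-- B's padded column for height budget n
def pvPad (n : Nat) (c : List String) : List String :=
  List.replicate (n - c.length) " " ++ c.reverse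

theorem length_pvPad (n : Nat) (c : List String) (h : c.length ≤ n) :
    (pvPad n c).length = n := by
  simp [pvPad]; omega

-- head of a padded column is the top cell
theorem head_pvPad (n : Nat) (c : List String) (h : c.length ≤ n + 1) :
    (pvPad (n + 1) c).headD "" = pvCell ((n : Int) + 1) c := by
  unfold pvPad pvCell
  by_cases hlt : c.length < n + 1
  · rw [if_pos (by push_cast; omega)]
    have : n + 1 - c.length = (n - c.length) + 1 := by omega
    rw [this, List.replicate_succ]
    simp
  · have heq : c.length = n + 1 := by omega
    rw [if_neg (by push_cast; omega)]
    have h1 : ((n : Int) + 1 - 1) = ((n : Nat) : Int) := by ring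
    rw [heq]
    simp only [Nat.sub_self, List.replicate_zero, List.nil_append, h1,
      PySem.List.pyGet?_natCast]
    cases c with
    | nil => simp at heq
    | cons a as =>
      have hn : n = as.length := by simpa using heq.symm
      subst hn
      rw [List.headD_eq_head?_getD, List.head?_reverse]
      rw [List.getLast?_eq_getElem?]
      simp

-- column shrink: what tail of the pad corresponds to
def pvShrink (n : Nat) (c : List String) : List String :=
  if c.length = n + 1 then c.dropLast else c

theorem tail_pvPad (n : Nat) (c : List String) (h : c.length ≤ n + 1) :
    (pvPad (n + 1) c).tail = pvPad n (pvShrink n c) := by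
  unfold pvPad pvShrink
  by_cases heq : c.length = n + 1
  · rw [if_pos heq, heq]
    simp only [Nat.sub_self, List.replicate_zero, List.nil_append]
    cases c with
    | nil => simp at heq
    | cons a as =>
      rw [← List.reverse_reverse (a :: as)] at *
      generalize (a :: as).reverse = r at *
      cases r with
      | nil => simp at heq
      | cons x xs =>
        simp only [List.reverse_cons, List.dropLast_concat, List.reverse_reverse] at *
        have : xs.length = n := by simp at heq; omega
        simp [this]
  · rw [if_neg heq]
    have : n + 1 - c.length = (n - c.length) + 1 := by omega
    rw [this, List.replicate_succ]
    simp

theorem pvCell_shrink (n : Nat) (c : List String) (hc : c.length ≤ n + 1)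
    (k : Nat) (hk : k < n) :
    pvCell ((k : Int) + 1) (pvShrink n c) = pvCell ((k : Int) + 1) c := by
  unfold pvShrink
  by_cases heq : c.length = n + 1
  · rw [if_pos heq]
    unfold pvCell
    have hdl : c.dropLast.length = n := by simp [heq]
    rw [if_neg (by push_cast; omega), if_neg (by push_cast; omega)]
    have h1 : ((k : Int) + 1 - 1) = ((k : Nat) : Int) := by ring
    rw [h1, PySem.List.pyGet?_natCast, PySem.List.pyGet?_natCast]
    rw [List.getElem?_dropLast]
    rw [if_pos (by omega)]
  · rw [if_neg heq]

-- the transposition of the padded matrix is exactly the list of rows, top first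
theorem zip_pad (n : Nat) : ∀ (w : List (List String)), w ≠ [] →
    (∀ c ∈ w, c.length ≤ n) →
    pyZip (w.map (pvPad n)) = pvRows w n := by
  induction n with
  | zero =>
    intro w hw hlen
    rw [pyZip]
    rw [dif_pos]
    · rfl
    · simp only [Bool.or_eq_true, List.any_eq_true, List.mem_map]
      right
      cases w with
      | nil => exact absurd rfl hw
      | cons c cs =>
        refine ⟨pvPad 0 c, ⟨c, by simp⟩, ?_⟩
        have : c.length = 0 := Nat.le_zero.mp (hlen c (by simp))
        simp [pvPad, List.length_eq_zero_iff.mp this]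
  | succ m ih =>
    intro w hw hlen
    rw [pyZip]
    rw [dif_neg]
    · have h1 : (w.map (pvPad (m + 1))).map (fun c => c.headD "") = w.map (pvCell ((m : Int) + 1)) := by
        rw [List.map_map]
        exact List.map_congr_left (fun c hc => head_pvPad m c (hlen c hc))
      have h2 : (w.map (pvPad (m + 1))).map (fun c => c.tail) = (w.map (pvShrink m)).map (pvPad m) := by
        rw [List.map_map, List.map_map]
        exact List.map_congr_left (fun c hc => tail_pvPad m c (hlen c hc))
      rw [h1, h2, ih (w.map (pvShrink m)) (by simpa using hw)]
      · show _ = pvRows w (m + 1)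
        simp only [pvRows]
        congr 1
        apply pvRows_congr
        intro k hk
        rw [List.map_map]
        exact List.map_congr_left (fun c hc => pvCell_shrink m c (hlen c hc) k hk)
      · intro c hc
        simp only [List.mem_map] at hc
        obtain ⟨c0, hc0, rfl⟩ := hc
        have := hlen c0 hc0
        unfold pvShrink
        split <;> simp <;> omega
    · simp only [Bool.or_eq_true, not_or]
      constructor
      · simp [List.isEmpty_iff, hw]
      · intro hany
        simp only [List.any_eq_true, List.mem_map] at hany
        obtain ⟨p, ⟨c, hc, rfl⟩, hemp⟩ := hany
        have hl : (pvPad (m + 1) c).length = m + 1 := length_pvPad (m + 1) c (hlen c hc)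
        rw [List.isEmpty_iff] at hemp
        rw [hemp] at hl
        simp at hl

-- every member of a ≤-pairwise list is at most its last element
theorem mem_le_getLast : ∀ (l : List Int), l.Pairwise (· ≤ ·) → ∀ x ∈ l, ∀ hne : l ≠ [], x ≤ l.getLast hne := by
  intro l
  induction l with
  | nil => intro _ x hx; simp at hx
  | cons a as ih =>
    intro hp x hx hne
    cases as with
    | nil => simp at hx; simp [hx, List.getLast]
    | cons b bs =>
      rw [List.getLast_cons (by simp)]
      rcases List.mem_cons.mp hx with rfl | hx'
      · have ha : ∀ y ∈ b :: bs, x ≤ y := (List.pairwise_cons.mp hp).1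
        exact le_trans (ha b (by simp))
          (ih (List.pairwise_cons.mp hp).2 b (by simp) (by simp))
      · exact ih (List.pairwise_cons.mp hp).2 x hx' (by simp)

theorem columns_max_height_eq (world : List (List String)) :
    columns_max_height world = world.map (fun c => (c.length : Int)) := by
  unfold columns_max_height
  suffices h : ∀ (acc : List Int),
      world.foldl (fun acc column => acc ++ [(column.length : Int)]) acc
        = acc ++ world.map (fun c => (c.length : Int)) by
    simpa using h []
  induction world with
  | nil => simp
  | cons c cs ih => intro acc; simp [ih]

-- the shared "tallest" value: it bounds every element of the height list and is nonnegative
theorem tallest_spec (hs : List Int) (hne0 : hs ≠ []) (hnn : ∀ x ∈ hs, 0 ≤ x) :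
    0 ≤ columns_tallest hs ∧ ∀ x ∈ hs, x ≤ columns_tallest hs := by
  have hne : PySem.List.sorted hs (fun x => x) false ≠ [] := by
    intro hcon
    have hperm := PySem.List.sorted_perm hs (fun x => x) false
    rw [hcon] at hperm
    exact hne0 hperm.symm.eq_nil
  unfold columns_tallest
  rw [PySem.List.pyGet?_neg_one, List.getLast?_eq_getLast hne]
  simp only [Option.getD_some]
  have hpw : (PySem.List.sorted hs (fun x => x) false).Pairwise (· ≤ ·) := by
    simpa using PySem.List.sorted_pairwise hs (fun x => x)
  have hlastmem : (PySem.List.sorted hs (fun x => x) false).getLast hne ∈ hs :=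
    (PySem.List.mem_sorted hs (fun x => x) false _).mp (List.getLast_mem hne)
  refine ⟨hnn _ hlastmem, fun x hx => ?_⟩
  exact mem_le_getLast _ hpw x ((PySem.List.mem_sorted hs (fun x => x) false _).mpr hx) hne

-- A's port equals the joined rows for any Nat naming its tallest height
theorem aChar (world : List (List String)) (n : Nat)
    (hT : columns_tallest (columns_max_height world) = (n : Int)) :
    world_to_string world
      = PySem.Str.join "\n" ((pvRows world n).map (fun row => PySem.Str.join "" row)) := by
  unfold world_to_string
  rw [hT, outerA]
  simp

-- B's port equals the same joined rows
theorem bChar (world : List (List String)) (n : Nat) (hw : world ≠ [])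
    (hT : ((PySem.List.pyGet? (PySem.List.sorted (world.map (fun d => (d.length : Int))) (fun x => x) false) (-1)).getD 0) = (n : Int))
    (hub : ∀ c ∈ world, c.length ≤ n) :
    world_to_string_alt world
      = PySem.Str.join "\n" ((pvRows world n).map (fun row => PySem.Str.join "" row)) := by
  unfold world_to_string_alt
  rw [hT]
  have hpad : world.map (fun c => List.replicate (((n : Int) - (c.length : Int)).toNat) " " ++ c.reverse)
      = world.map (pvPad n) := by
    apply List.map_congr_left
    intro c hc
    unfold pvPad
    congr 1
    congr 1
    have := hub c hc
    omega
  rw [hpad, zip_pad n world hw hub]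

-- ===== VERDICT (by name: the statement is the Claim_ definition above) =====
theorem world_to_string_spec : Claim_equal_world_to_string := by
  intro world _ hpre
  unfold Spec_world_to_string
  obtain ⟨hnn, hub⟩ := tallest_spec (world.map (fun c => (c.length : Int)))
      (by simpa using hpre)
      (by intro x hx
          simp only [List.mem_map] at hx
          obtain ⟨c, _, rfl⟩ := hx
          exact Int.natCast_nonneg _)
  rw [aChar world (columns_tallest (world.map (fun c => (c.length : Int)))).toNat
        (by rw [columns_max_height_eq]; omega),
      bChar world (columns_tallest (world.map (fun c => (c.length : Int)))).toNat hpre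
        (by show columns_tallest (world.map (fun d => (d.length : Int))) = _
            omega)
        (fun c hc => by
          have := hub _ (List.mem_map.mpr ⟨c, hc, rfl⟩)
          omega)]
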